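-- pv_equiv track=rewrite | github.com/SanJinYe/Xplainer_demo | tailevents/indexer/ast_analyzer.py | _build_workspace_modules
-- ===== SOURCE A (Python) =====
-- def _build_workspace_modules(entity_files: dict[str, str]) -> set[str]:
--     modules: set[str] = set()
--     for file_path in entity_files.values():
--         normalized = file_path.replace("\\", "/")
--         if not normalized.endswith(".py"):
--             continue
--         stem = normalized[:-3]
--         parts = [part for part in stem.split("/") if part]
--         if not parts:
--             continue
--         if parts[-1] == "__init__":
--             parts = parts[:-1]
--         if not parts:
--             continue
--         module_name = ".".join(parts)
--         modules.add(module_name)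
--         for index in range(1, len(parts)):
--             modules.add(".".join(parts[:index]))
--     return modules
-- ===== SOURCE B (Python) =====
-- def _module_prefixes(file_path: str) -> list[str]:
--     normalized = file_path.replace("\\", "/")
--     if not normalized.endswith(".py"):
--         return []
--     parts = [part for part in normalized[:-3].split("/") if part]
--     if parts and parts[-1] == "__init__":
--         parts.pop()
--     prefixes: list[str] = []
--     for part in parts:
--         prefixes.append(part if not prefixes else prefixes[-1] + "." + part)
--     return prefixes
--
--
-- def _build_workspace_modules(entity_files: dict[str, str]) -> set[str]:
--     modules: set[str] = set()
--     for file_path in entity_files.values():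
--         prefixes = _module_prefixes(file_path)
--         if prefixes:
--             modules.add(prefixes[-1])
--             modules.update(prefixes[:-1])
--     return modules
-- ===== Notes on version B (the rewrite author's own statement) =====
-- stated objective: simpler
-- what changed: A re-joins parts[:index] from scratch for every ancestor; B makes one accumulating scan that extends a running dotted prefix per part and collects all prefixes, then registers the full name and its ancestors.
import Mathlib
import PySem

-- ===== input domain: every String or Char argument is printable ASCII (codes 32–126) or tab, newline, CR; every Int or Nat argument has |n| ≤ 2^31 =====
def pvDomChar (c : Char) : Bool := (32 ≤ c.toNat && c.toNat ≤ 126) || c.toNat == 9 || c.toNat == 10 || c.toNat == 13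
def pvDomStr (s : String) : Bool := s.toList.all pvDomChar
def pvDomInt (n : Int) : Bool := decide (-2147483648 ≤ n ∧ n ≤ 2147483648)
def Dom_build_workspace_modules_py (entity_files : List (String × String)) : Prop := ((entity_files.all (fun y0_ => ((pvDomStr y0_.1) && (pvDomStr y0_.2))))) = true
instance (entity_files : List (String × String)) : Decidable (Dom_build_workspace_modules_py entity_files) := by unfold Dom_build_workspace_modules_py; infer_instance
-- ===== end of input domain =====

-- B replaces A's repeated full `".".join(parts[:index])` re-joins with one accumulating
-- scan that extends a running dotted prefix per part (objective: simpler).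

-- ===== PORT A =====
-- one iteration of A's `for file_path in entity_files.values()` body
def buildStepA (modules : PySem.Set String) (file_path : String) : PySem.Set String :=
  let normalized := PySem.Chars.replace file_path.toList ['\\'] ['/']
  if !(PySem.Chars.endswith normalized ".py".toList) then modules
  else
    let stem := PySem.List.slice normalized none (some (-3))
    let parts := (PySem.Chars.splitOn stem ['/']).filter (fun part => !part.isEmpty)
    if parts.isEmpty then modules
    else
      let parts := if PySem.List.pyGetD parts (-1) [] = "__init__".toList then
          PySem.List.slice parts none (some (-1)) else parts
      if parts.isEmpty then modules
      else
        let module_name := PySem.Chars.join ['.'] parts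
        let modules := modules.add (String.ofList module_name)
        (PySem.List.pyRange 1 (PySem.List.len parts) 1).foldl
          (fun modules index =>
            modules.add (String.ofList (PySem.Chars.join ['.'] (PySem.List.slice parts none (some index)))))
          modules

def build_workspace_modules_py (entity_files : List (String × String)) : List String :=
  ((PySem.Dict.ofList entity_files).values.foldl buildStepA PySem.Set.empty : PySem.Set String)

-- ===== PORT B =====
-- all dotted module prefixes of one file path, built by one accumulating scan
def modulePrefixes (file_path : String) : List (List Char) :=
  let normalized := PySem.Chars.replace file_path.toList ['\\'] ['/']
  if !(PySem.Chars.endswith normalized ".py".toList) then []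
  else
    let parts := (PySem.Chars.splitOn (PySem.List.slice normalized none (some (-3))) ['/']).filter
      (fun part => !part.isEmpty)
    -- `parts.pop()` drops the last element (parts is nonempty in this branch): dropLast is exact
    let parts := if !parts.isEmpty ∧ PySem.List.pyGetD parts (-1) [] = "__init__".toList then
        parts.dropLast else parts
    parts.foldl
      (fun prefixes part =>
        prefixes ++ [if prefixes.isEmpty then part else PySem.List.pyGetD prefixes (-1) [] ++ '.' :: part])
      []

def build_workspace_modules_py_alt (entity_files : List (String × String)) : List String :=
  ((PySem.Dict.ofList entity_files).values.foldl
    (fun modules file_path =>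
      let prefixes := modulePrefixes file_path
      if prefixes.isEmpty then modules
      else
        (modules.add (String.ofList (PySem.List.pyGetD prefixes (-1) []))).update
          ((PySem.List.slice prefixes none (some (-1))).map String.ofList))
    PySem.Set.empty : PySem.Set String)

-- ===== PRECONDITION & SPEC =====
def Spec_build_workspace_modules_py (entity_files : List (String × String)) (out : List String) : Prop := out = build_workspace_modules_py_alt entity_files
instance (entity_files : List (String × String)) (out : List String) : Decidable (Spec_build_workspace_modules_py entity_files out) := by unfold Spec_build_workspace_modules_py; infer_instance

-- ===== CLAIM (what is proved, stated in full; the proofs are below) =====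
def Claim_equal_build_workspace_modules_py : Prop := ∀ (entity_files : List (String × String)), Dom_build_workspace_modules_py entity_files → Spec_build_workspace_modules_py entity_files (build_workspace_modules_py entity_files)

-- ===== LEMMAS AND PROOFS =====

-- the dotted prefixes of l, as A computes them: the join of each take
def prefixList (l : List (List Char)) : List (List Char) :=
  (List.range l.length).map (fun k => PySem.Chars.join ['.'] (l.take (k + 1)))

theorem join_cons_cons (x y : List Char) (l : List (List Char)) :
    PySem.Chars.join ['.'] (x :: y :: l) = x ++ '.' :: PySem.Chars.join ['.'] (y :: l) := by
  simp [PySem.Chars.join, List.intercalate, List.intersperse]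

theorem join_cons_ne (x : List Char) (l : List (List Char)) (h : l ≠ []) :
    PySem.Chars.join ['.'] (x :: l) = x ++ '.' :: PySem.Chars.join ['.'] l := by
  cases l with
  | nil => exact absurd rfl h
  | cons y ys => exact join_cons_cons x y ys

theorem join_append_singleton (l : List (List Char)) (p : List Char) (h : l ≠ []) :
    PySem.Chars.join ['.'] (l ++ [p]) = PySem.Chars.join ['.'] l ++ '.' :: p := by
  induction l with
  | nil => exact absurd rfl h
  | cons x xs ih =>
    cases xs with
    | nil => simpa using join_cons_cons x p []
    | cons y ys =>
      rw [List.cons_append, join_cons_ne x ((y :: ys) ++ [p]) (by simp),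
        ih (by simp), join_cons_ne x (y :: ys) (by simp)]
      simp

theorem getLast_prefixList (l : List (List Char)) (h : l ≠ []) :
    (prefixList l).getLast (by simp [prefixList, h]) = PySem.Chars.join ['.'] l := by
  rw [List.getLast_eq_getElem]
  have hpos : 0 < l.length := List.length_pos_iff.mpr h
  simp only [prefixList]
  have hlen : l.length - 1 < (List.range l.length).length := by
    rw [List.length_range]; omega
  rw [List.getElem_map]
  have : l.length - 1 + 1 = l.length := by omega
  simp [this]

theorem prefixList_append_singleton (l : List (List Char)) (p : List Char) (h : l ≠ []) :
    prefixList (l ++ [p]) = prefixList l ++ [PySem.Chars.join ['.'] l ++ '.' :: p] := by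
  unfold prefixList
  rw [List.length_append, List.length_singleton, List.range_succ, List.map_append]
  congr 1
  · apply List.map_congr_left
    intro k hk
    simp only [List.mem_range] at hk
    rw [List.take_append_of_le_length (by omega)]
  · simp [List.take_of_length_le, join_append_singleton l p h]

-- B's scan step
def scanStep (prefixes : List (List Char)) (part : List Char) : List (List Char) :=
  prefixes ++ [if prefixes.isEmpty then part else PySem.List.pyGetD prefixes (-1) [] ++ '.' :: part]

theorem scan_go (rest : List (List Char)) (done : List (List Char)) (h : done ≠ []) :
    rest.foldl scanStep (prefixList done) = prefixList (done ++ rest) := by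
  induction rest generalizing done with
  | nil => simp
  | cons p ps ih =>
    have hne : prefixList done ≠ [] := by
      simp only [prefixList, ne_eq, List.map_eq_nil_iff, List.range_eq_nil]
      exact fun hl => h (List.length_eq_zero_iff.mp hl)
    have hstep : scanStep (prefixList done) p
        = prefixList (done ++ [p]) := by
      unfold scanStep
      rw [if_neg (by simpa [List.isEmpty_iff] using hne),
        PySem.List.pyGetD_neg_one _ _ hne, getLast_prefixList done h,
        prefixList_append_singleton done p h]
    rw [List.foldl_cons, hstep, ih (done ++ [p]) (by simp), List.append_assoc]
    rfl

theorem scan_eq (l : List (List Char)) : l.foldl scanStep [] = prefixList l := by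
  cases l with
  | nil => rfl
  | cons p ps =>
    have h1 : scanStep [] p = prefixList [p] := by
      simp [scanStep, prefixList, PySem.Chars.join, List.intercalate]
    rw [List.foldl_cons, h1, scan_go ps [p] (by simp)]
    rfl

theorem pyRange_one_map (m : Nat) :
    PySem.List.pyRange 1 ((m : Int) + 1) = (List.range m).map (fun k : Nat => ((k : Int) + 1)) := by
  induction m with
  | zero => decide
  | succ n ih =>
    rw [List.range_succ, List.map_append,
      show ((n + 1 : Nat) : Int) + 1 = (((n : Int) + 1) + 1) by push_cast; ring,
      PySem.List.pyRange_one_succ_right (by omega), ih]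
    simp

theorem main_branch (modules : PySem.Set String) (parts : List (List Char)) (hp : parts ≠ []) :
    ((PySem.List.pyRange 1 (PySem.List.len parts) 1).foldl
       (fun modules index =>
         modules.add (String.ofList (PySem.Chars.join ['.'] (PySem.List.slice parts none (some index)))))
       (modules.add (String.ofList (PySem.Chars.join ['.'] parts)))) =
    (if (parts.foldl scanStep []).isEmpty then modules
     else
       (modules.add (String.ofList (PySem.List.pyGetD (parts.foldl scanStep []) (-1) []))).update
         ((PySem.List.slice (parts.foldl scanStep []) none (some (-1))).map String.ofList)) := by
  rw [scan_eq]
  have hne : prefixList parts ≠ [] := by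
    simp only [prefixList, ne_eq, List.map_eq_nil_iff, List.range_eq_nil]
    exact fun hl => hp (List.length_eq_zero_iff.mp hl)
  rw [if_neg (by simpa [List.isEmpty_iff] using hne),
    PySem.List.pyGetD_neg_one _ _ hne, getLast_prefixList parts hp,
    PySem.List.slice_to_neg_one, PySem.Set.update_map_eq_foldl_add]
  -- both sides now fold `add` from the same start; show the folded lists coincide
  obtain ⟨m, hm⟩ : ∃ m, parts.length = m + 1 :=
    ⟨parts.length - 1, (Nat.succ_pred_eq_of_pos (List.length_pos_iff.mpr hp)).symm⟩
  have hlen : PySem.List.len parts = (m : Int) + 1 := by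
    simp [PySem.List.len_eq, hm]
  have hdrop : (prefixList parts).dropLast
      = (List.range m).map (fun k => PySem.Chars.join ['.'] (parts.take (k + 1))) := by
    unfold prefixList
    rw [hm, List.range_succ, List.map_append]
    simp
  rw [hlen, pyRange_one_map, hdrop, List.foldl_map, List.foldl_map]
  congr 1
  funext s k
  rw [show ((k : Int) + 1) = ((k + 1 : Nat) : Int) by push_cast; ring,
    PySem.List.slice_to_natCast]

theorem step_eq (modules : PySem.Set String) (file_path : String) :
    buildStepA modules file_path =
      (let prefixes := modulePrefixes file_path
       if prefixes.isEmpty then modules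
       else
         (modules.add (String.ofList (PySem.List.pyGetD prefixes (-1) []))).update
           ((PySem.List.slice prefixes none (some (-1))).map String.ofList)) := by
  simp only [buildStepA, modulePrefixes]
  by_cases hpy : PySem.Chars.endswith (PySem.Chars.replace file_path.toList ['\\'] ['/']) ".py".toList
  · simp only [hpy, Bool.not_true, Bool.false_eq_true, if_false]
    set parts0 := (PySem.Chars.splitOn
        (PySem.List.slice (PySem.Chars.replace file_path.toList ['\\'] ['/']) none (some (-3))) ['/']).filter
        (fun part => !part.isEmpty)
    have hb : ∀ l : List (List Char), l = [] →
        modules = (if (l.foldl scanStep []).isEmpty then modules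
          else (modules.add (String.ofList (PySem.List.pyGetD (l.foldl scanStep []) (-1) []))).update
            ((PySem.List.slice (l.foldl scanStep []) none (some (-1))).map String.ofList)) := by
      rintro l rfl; rfl
    by_cases hp0 : parts0 = []
    · have h1 : ¬((!parts0.isEmpty) = true ∧ PySem.List.pyGetD parts0 (-1) [] = "__init__".toList) := by
        simp [hp0]
      have hA : parts0.isEmpty = true := by simp [hp0]
      rw [if_pos hA, if_neg h1]
      exact hb parts0 hp0
    · have hp0' : ¬(parts0.isEmpty = true) := by simpa [List.isEmpty_iff] using hp0
      rw [if_neg hp0']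
      by_cases hinit : PySem.List.pyGetD parts0 (-1) [] = "__init__".toList
      · have hcond : (!parts0.isEmpty) = true ∧ PySem.List.pyGetD parts0 (-1) [] = "__init__".toList :=
          ⟨by simpa using hp0, hinit⟩
        rw [if_pos hinit, if_pos hcond, PySem.List.slice_to_neg_one]
        by_cases hd : parts0.dropLast = []
        · have hA2 : parts0.dropLast.isEmpty = true := by simp [hd]
          rw [if_pos hA2]
          exact hb _ hd
        · have hA2 : ¬(parts0.dropLast.isEmpty = true) := by simpa using hd
          rw [if_neg hA2]
          exact main_branch modules parts0.dropLast hd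
      · have hcond' : ¬((!parts0.isEmpty) = true ∧ PySem.List.pyGetD parts0 (-1) [] = "__init__".toList) :=
          fun hc => hinit hc.2
        rw [if_neg hinit, if_neg hcond', if_neg hp0']
        exact main_branch modules parts0 hp0
  · have he : PySem.Chars.endswith (PySem.Chars.replace file_path.toList ['\\'] ['/']) ".py".toList = false := by
      simpa using hpy
    simp only [he, Bool.not_false, if_true, List.isEmpty_nil]

theorem build_workspace_modules_py_spec : Claim_equal_build_workspace_modules_py := by
  intro entity_files _
  unfold Spec_build_workspace_modules_py build_workspace_modules_py build_workspace_modules_py_alt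
  congr 1
  funext modules file_path
  exact step_eq modules file_path
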